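-- pv_equiv track=rewrite | github.com/zhoumengbo/algorithm_lesson | final_test/test_2.py | addPoint
-- ===== SOURCE A (Python) =====
-- def addPoint(group_A, group_B, point_list, distance_list, order_list):
--     order_set = {key: distance_list[0][key] for key in order_list}
--     order_set = sorted(order_set.items(), key=lambda x: x[1], reverse=False)
--     order_list = [order_set[key][0] for key in range(len(order_list))]
--     for index in order_list:  # 依据对初始点距离长度从小到大进行遍历
--         min_A, min_B = 99999, 99999
--         for point_index in group_A:
--             dis = distance_list[index][point_index]
--             if dis < min_A:
--                 min_A = dis
--         for point_index in group_B:
--             dis = distance_list[index][point_index]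
--             if dis < min_B:
--                 min_B = dis
--         if min_A < min_B:
--             group_A.append(index)
--         else:
--             group_B.append(index)
--     for index in range(len(group_A)):
--         group_A[index] = point_list[group_A[index]]
--     for index in range(len(group_B)):
--         group_B[index] = point_list[group_B[index]]
--     return group_A, group_B
-- ===== SOURCE B (Python) =====
-- def addPoint(group_A, group_B, point_list, distance_list, order_list):
--     # NOTE: unlike A, this implementation does not mutate group_A / group_B in place.
--     def group_min(row, pts):
--         m = 99999
--         for p in pts:
--             if row[p] < m:
--                 m = row[p]
--         return m
--
--     order = sorted(order_list, key=lambda k: distance_list[0][k])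
--     pend = [(k, group_min(distance_list[k], group_A),
--                 group_min(distance_list[k], group_B)) for k in order]
--     idx_A, idx_B = [], []
--     while pend:
--         (k, mA, mB), pend = pend[0], pend[1:]
--         if mA < mB:
--             idx_A.append(k)
--             pend = [(j, min(mj, distance_list[j][k]), nj) for (j, mj, nj) in pend]
--         else:
--             idx_B.append(k)
--             pend = [(j, mj, min(nj, distance_list[j][k])) for (j, mj, nj) in pend]
--     return ([point_list[g] for g in group_A] + [point_list[k] for k in idx_A],
--             [point_list[g] for g in group_B] + [point_list[k] for k in idx_B])
-- ===== Notes on version B (the rewrite author's own statement) =====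
-- stated objective: alternative
-- what changed: Phase 1's dict-then-sorted(items)-then-index-extraction becomes a direct stable sort of order_list, and the per-index rescans of both (growing) groups are replaced by a pending list of (index, min_A, min_B) cached minima updated incrementally as each point is assigned; B also does not mutate group_A/group_B in place.
-- outside the precondition, e.g. on addPoint([], [], [7, 8], [[5, 3]], [1]): A returns ([], [8]), B raises IndexError; on addPoint([], [], [7, 8], [[9, 1], [0]], [1, 0]): A returns ([], [8, 7]), B returns ([], [8, 7]); on addPoint([], [], [10, 20], [[0, 1], [1, 0]], [0, 0]): A raises IndexError, B returns ([], [10, 10])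
import Mathlib
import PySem

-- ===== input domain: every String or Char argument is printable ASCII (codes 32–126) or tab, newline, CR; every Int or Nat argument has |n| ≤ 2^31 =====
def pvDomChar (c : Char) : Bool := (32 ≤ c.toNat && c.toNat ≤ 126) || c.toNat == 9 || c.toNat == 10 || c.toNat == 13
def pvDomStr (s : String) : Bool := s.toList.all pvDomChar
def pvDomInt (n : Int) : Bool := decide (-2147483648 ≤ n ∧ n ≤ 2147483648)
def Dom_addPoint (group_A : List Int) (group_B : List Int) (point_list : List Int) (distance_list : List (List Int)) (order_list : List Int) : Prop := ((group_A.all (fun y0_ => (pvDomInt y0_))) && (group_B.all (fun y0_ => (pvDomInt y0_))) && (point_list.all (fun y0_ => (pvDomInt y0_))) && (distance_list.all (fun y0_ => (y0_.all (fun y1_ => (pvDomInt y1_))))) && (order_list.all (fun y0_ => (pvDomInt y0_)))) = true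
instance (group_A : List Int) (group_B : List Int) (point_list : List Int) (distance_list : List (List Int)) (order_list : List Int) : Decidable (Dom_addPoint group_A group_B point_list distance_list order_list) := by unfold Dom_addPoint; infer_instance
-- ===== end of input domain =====

-- B replaces A's dict/sorted-items phase by a direct stable sort and A's per-index rescans of the
-- growing groups by incrementally updated cached minima; equivalence is about the RETURN value only
-- (A mutates group_A/group_B in place, B does not).

-- ===== PORT A =====
-- inner scan 'for point_index in g: dis = ...; if dis < m: m = dis' starting from 99999
def pvMinScan (row : List Int) (pts : List Int) : Int :=
  pts.foldl (fun m p =>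
    let dis := PySem.List.pyGetD row p 0
    if dis < m then dis else m) 99999

-- one iteration of A's main loop body
def pvStepA (distance_list : List (List Int)) (g : List Int × List Int) (index : Int) :
    List Int × List Int :=
  let min_A := pvMinScan (PySem.List.pyGetD distance_list index []) g.1
  let min_B := pvMinScan (PySem.List.pyGetD distance_list index []) g.2
  if min_A < min_B then (g.1 ++ [index], g.2) else (g.1, g.2 ++ [index])

def addPoint (group_A : List Int) (group_B : List Int) (point_list : List Int) (distance_list : List (List Int)) (order_list : List Int) : List Int × List Int :=
  let order_set : PySem.Dict Int Int :=
    order_list.foldl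
      (fun d key => d.insert key (PySem.List.pyGetD (PySem.List.pyGetD distance_list 0 []) key 0))
      PySem.Dict.empty
  let sorted_items := PySem.List.sorted order_set.items (fun x => x.2) false
  let order_list2 := (PySem.List.pyRange 0 (order_list.length : Int)).map
      (fun key => (PySem.List.pyGetD sorted_items key ((0 : Int), (0 : Int))).1)
  let g := order_list2.foldl (pvStepA distance_list) (group_A, group_B)
  (g.1.map (fun i => PySem.List.pyGetD point_list i 0),
   g.2.map (fun i => PySem.List.pyGetD point_list i 0))

-- ===== PORT B =====
-- Source B's group_min helper
def pvGroupMin (row : List Int) (pts : List Int) : Int :=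
  pts.foldl (fun m p =>
    if PySem.List.pyGetD row p 0 < m then PySem.List.pyGetD row p 0 else m) 99999

-- Source B's while loop over the pending (index, min_A, min_B) triples; the fuel argument
-- (always called with fuel = pend.length) only makes the recursion structural.
def pvWalk (distance_list : List (List Int)) :
    Nat → List (Int × Int × Int) → List Int → List Int → List Int × List Int
  | _, [], idx_A, idx_B => (idx_A, idx_B)
  | 0, _ :: _, idx_A, idx_B => (idx_A, idx_B)
  | fuel + 1, (k, mA, mB) :: pend, idx_A, idx_B =>
    if mA < mB then
      pvWalk distance_list fuel
        (pend.map (fun t =>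
          (t.1, min t.2.1 (PySem.List.pyGetD (PySem.List.pyGetD distance_list t.1 []) k 0), t.2.2)))
        (idx_A ++ [k]) idx_B
    else
      pvWalk distance_list fuel
        (pend.map (fun t =>
          (t.1, t.2.1, min t.2.2 (PySem.List.pyGetD (PySem.List.pyGetD distance_list t.1 []) k 0))))
        idx_A (idx_B ++ [k])

def addPoint_alt (group_A : List Int) (group_B : List Int) (point_list : List Int) (distance_list : List (List Int)) (order_list : List Int) : List Int × List Int :=
  let order := PySem.List.sorted order_list
    (fun k => PySem.List.pyGetD (PySem.List.pyGetD distance_list 0 []) k 0)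
  let pend := order.map (fun k =>
    (k, pvGroupMin (PySem.List.pyGetD distance_list k []) group_A,
        pvGroupMin (PySem.List.pyGetD distance_list k []) group_B))
  let r := pvWalk distance_list pend.length pend [] []
  (group_A.map (fun i => PySem.List.pyGetD point_list i 0)
     ++ r.1.map (fun i => PySem.List.pyGetD point_list i 0),
   group_B.map (fun i => PySem.List.pyGetD point_list i 0)
     ++ r.2.map (fun i => PySem.List.pyGetD point_list i 0))

-- ===== PRECONDITION & SPEC =====
-- Pre_ excludes (a) duplicate order_list entries, on which A raises IndexError, and (b) out-of-range
-- indices, on which A raises; clause (b) mildly over-approximates the accesses A performs (A returns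
-- on some ragged distance_list inputs whose missing row/entry it never happens to read — see cites).
def Pre_addPoint (group_A : List Int) (group_B : List Int) (point_list : List Int) (distance_list : List (List Int)) (order_list : List Int) : Prop :=
  order_list.Nodup ∧
  (∀ g ∈ group_A ++ group_B ++ order_list, PySem.Raise.InRange point_list.length g) ∧
  (order_list ≠ [] →
    distance_list ≠ [] ∧
    (∀ k ∈ order_list,
      PySem.Raise.InRange (PySem.List.pyGetD distance_list 0 []).length k ∧
      PySem.Raise.InRange distance_list.length k ∧
      ∀ p ∈ group_A ++ group_B ++ order_list,
        PySem.Raise.InRange (PySem.List.pyGetD distance_list k []).length p))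
instance (group_A : List Int) (group_B : List Int) (point_list : List Int) (distance_list : List (List Int)) (order_list : List Int) : Decidable (Pre_addPoint group_A group_B point_list distance_list order_list) := by unfold Pre_addPoint; infer_instance

def pvWitness_addPoint : List Int × List Int × List Int × List (List Int) × List Int :=
  ([0], [1], [10, 20, 30], [[0, 1, 2], [3, 4, 5], [6, 7, 8]], [2])

def Spec_addPoint (group_A : List Int) (group_B : List Int) (point_list : List Int) (distance_list : List (List Int)) (order_list : List Int) (out : List Int × List Int) : Prop := out = addPoint_alt group_A group_B point_list distance_list order_list
instance (group_A : List Int) (group_B : List Int) (point_list : List Int) (distance_list : List (List Int)) (order_list : List Int) (out : List Int × List Int) : Decidable (Spec_addPoint group_A group_B point_list distance_list order_list out) := by unfold Spec_addPoint; infer_instance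

-- ===== CLAIM (what is proved, stated in full; the proofs are below) =====
def Claim_equal_addPoint : Prop := ∀ (group_A : List Int) (group_B : List Int) (point_list : List Int) (distance_list : List (List Int)) (order_list : List Int), Dom_addPoint group_A group_B point_list distance_list order_list → Pre_addPoint group_A group_B point_list distance_list order_list → Spec_addPoint group_A group_B point_list distance_list order_list (addPoint group_A group_B point_list distance_list order_list)


-- ===== LEMMAS AND PROOFS =====

theorem pvGroupMin_eq_pvMinScan (row pts : List Int) : pvGroupMin row pts = pvMinScan row pts := rfl

-- pvMinScan over one appended point is a min with that point's distance
theorem pvMinScan_append (row pts : List Int) (k : Int) :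
    pvMinScan row (pts ++ [k]) =
      min (pvMinScan row pts) (PySem.List.pyGetD row k 0) := by
  unfold pvMinScan
  rw [List.foldl_append]
  simp only [List.foldl_cons, List.foldl_nil]
  rw [min_def]
  split_ifs <;> omega

-- stable insertion commutes with mapping when the comparison is transported
theorem insertBy_map {α β : Type} (g : α → β) (p : α → α → Bool) (q : β → β → Bool)
    (h : ∀ a b, q (g a) (g b) = p a b) (x : α) (ys : List α) :
    PySem.List.insertBy q (g x) (ys.map g) = (PySem.List.insertBy p x ys).map g := by
  induction ys with
  | nil => simp [PySem.List.insertBy]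
  | cons y ys ih =>
    simp only [List.map_cons, PySem.List.insertBy, h]
    by_cases hc : p x y = true
    · simp [hc]
    · simp [hc, ih]

-- Python's stable sort of (k, f k) pairs by the second component is the stable sort of the keys by f
theorem sorted_map_pair (l : List Int) (f : Int → Int) :
    PySem.List.sorted (l.map (fun k => (k, f k))) (fun x => x.2) false
      = (PySem.List.sorted l f false).map (fun k => (k, f k)) := by
  rw [PySem.List.sorted_eq_foldl_insertBy, PySem.List.sorted_eq_foldl_insertBy]
  suffices h : ∀ acc : List Int,
      (l.map (fun k => (k, f k))).foldl
        (fun acc x => PySem.List.insertBy (fun a b => decide ((a : Int × Int).2 < b.2)) x acc)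
        (acc.map (fun k => (k, f k)))
      = (l.foldl (fun acc x => PySem.List.insertBy (fun a b => decide (f a < f b)) x acc) acc).map
          (fun k => (k, f k)) by
    simpa using h []
  induction l with
  | nil => intro acc; simp
  | cons a l ih =>
    intro acc
    simp only [List.map_cons, List.foldl_cons]
    rw [insertBy_map (fun k => (k, f k)) (fun a b => decide (f a < f b))
      (fun a b => decide (a.2 < b.2)) (fun _ _ => rfl) a acc]
    exact ih _

-- A's phase-1 dict built over Nodup keys lists exactly the (key, value) pairs in order
theorem items_fold (ol : List Int) (f : Int → Int) (h : ol.Nodup) :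
    (ol.foldl (fun d key => d.insert key (f key)) (PySem.Dict.empty : PySem.Dict Int Int)).items
      = ol.map (fun k => (k, f k)) := by
  have := PySem.Dict.items_foldl_insert_fresh ol (fun a => a) f PySem.Dict.empty
    (fun a _ => PySem.Dict.contains_empty a) (by simpa using h)
  simpa using this

-- A's phase 1 (dict, sorted items, index extraction) equals B's direct stable sort
theorem phase1 (ol : List Int) (f : Int → Int) (h : ol.Nodup) :
    ((PySem.List.pyRange 0 (ol.length : Int)).map
      (fun key => (PySem.List.pyGetD
        (PySem.List.sorted
          ((ol.foldl (fun d key => d.insert key (f key)) (PySem.Dict.empty : PySem.Dict Int Int)).items)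
          (fun x => x.2) false)
        key ((0 : Int), (0 : Int))).1))
    = PySem.List.sorted ol f false := by
  rw [items_fold ol f h, sorted_map_pair]
  set ys := (PySem.List.sorted ol f false).map (fun k => (k, f k)) with hys
  have hlen : (ol.length : Int) = (ys.length : Int) := by
    simp [hys, PySem.List.length_sorted]
  rw [hlen]
  have : ((PySem.List.pyRange 0 (ys.length : Int)).map
      (fun key => PySem.List.pyGetD ys key ((0 : Int), (0 : Int)))).map (fun p => p.1)
      = ys.map (fun p => p.1) := by
    rw [PySem.List.map_pyGetD_pyRange_zero']
  rw [List.map_map] at this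
  have h2 : ys.map (fun p => p.1) = PySem.List.sorted ol f false := by
    simp [hys, List.map_map, Function.comp_def]
  rw [← h2]
  exact this

def mkPend (dl : List (List Int)) (order gA gB : List Int) : List (Int × Int × Int) :=
  order.map (fun k =>
    (k, pvMinScan (PySem.List.pyGetD dl k []) gA, pvMinScan (PySem.List.pyGetD dl k []) gB))

theorem mkPend_update_A (dl : List (List Int)) (rest gA gB : List Int) (k : Int) :
    (mkPend dl rest gA gB).map (fun t =>
        (t.1, min t.2.1 (PySem.List.pyGetD (PySem.List.pyGetD dl t.1 []) k 0), t.2.2))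
      = mkPend dl rest (gA ++ [k]) gB := by
  simp [mkPend, List.map_map, Function.comp, pvMinScan_append]

theorem mkPend_update_B (dl : List (List Int)) (rest gA gB : List Int) (k : Int) :
    (mkPend dl rest gA gB).map (fun t =>
        (t.1, t.2.1, min t.2.2 (PySem.List.pyGetD (PySem.List.pyGetD dl t.1 []) k 0)))
      = mkPend dl rest gA (gB ++ [k]) := by
  simp [mkPend, List.map_map, Function.comp, pvMinScan_append]

-- the accumulators of pvWalk only collect output
theorem pvWalk_shift (dl : List (List Int)) :
    ∀ (n : Nat) (pend : List (Int × Int × Int)), pend.length = n → ∀ ia ib,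
      pvWalk dl n pend ia ib =
        (ia ++ (pvWalk dl n pend [] []).1, ib ++ (pvWalk dl n pend [] []).2) := by
  intro n
  induction n with
  | zero =>
    intro pend h ia ib
    match pend, h with
    | [], _ => simp [pvWalk]
  | succ n ih =>
    intro pend h ia ib
    match pend, h with
    | (k, mA, mB) :: rest, h =>
      have hr : rest.length = n := by simpa using h
      simp only [pvWalk]
      by_cases hc : mA < mB
      · simp only [if_pos hc]
        rw [ih _ (by simpa using hr), ih _ (by simpa using hr) ([] ++ [k]) []]
        simp
      · simp only [if_neg hc]
        rw [ih _ (by simpa using hr), ih _ (by simpa using hr) [] ([] ++ [k])]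
        simp

-- A's main loop equals B's walk over the cached minima
theorem loop_eq (dl : List (List Int)) :
    ∀ (order gA gB : List Int),
      order.foldl (pvStepA dl) (gA, gB) =
        (gA ++ (pvWalk dl order.length (mkPend dl order gA gB) [] []).1,
         gB ++ (pvWalk dl order.length (mkPend dl order gA gB) [] []).2) := by
  intro order
  induction order with
  | nil => intro gA gB; simp [mkPend, pvWalk]
  | cons k rest ih =>
    intro gA gB
    have hlen : (mkPend dl rest (gA ++ [k]) gB).length = rest.length := by
      simp [mkPend]
    have hlen' : (mkPend dl rest gA (gB ++ [k])).length = rest.length := by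
      simp [mkPend]
    have hhead : mkPend dl (k :: rest) gA gB =
        (k, pvMinScan (PySem.List.pyGetD dl k []) gA,
            pvMinScan (PySem.List.pyGetD dl k []) gB) :: mkPend dl rest gA gB := rfl
    rw [List.foldl_cons, hhead]
    simp only [List.length_cons, pvWalk]
    by_cases hc : pvMinScan (PySem.List.pyGetD dl k []) gA
        < pvMinScan (PySem.List.pyGetD dl k []) gB
    · rw [show pvStepA dl (gA, gB) k = (gA ++ [k], gB) by simp [pvStepA, hc]]
      rw [if_pos hc, mkPend_update_A,
        pvWalk_shift dl rest.length _ hlen ([] ++ [k]) [], ih (gA ++ [k]) gB]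
      simp
    · rw [show pvStepA dl (gA, gB) k = (gA, gB ++ [k]) by simp [pvStepA, hc]]
      rw [if_neg hc, mkPend_update_B,
        pvWalk_shift dl rest.length _ hlen' [] ([] ++ [k]), ih gA (gB ++ [k])]
      simp

-- ===== VERDICT (by name: the statement is the Claim_ definition above) =====
theorem addPoint_spec : Claim_equal_addPoint := by
  intro gA gB pl dl ol _ hpre
  obtain ⟨hnd, -, -⟩ := hpre
  simp only [Spec_addPoint, addPoint, addPoint_alt]
  rw [phase1 ol _ hnd]
  set order := PySem.List.sorted ol
    (fun k => PySem.List.pyGetD (PySem.List.pyGetD dl 0 []) k 0) false with horder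
  simp only [pvGroupMin_eq_pvMinScan]
  have hpend : (order.map (fun k =>
      (k, pvMinScan (PySem.List.pyGetD dl k []) gA,
          pvMinScan (PySem.List.pyGetD dl k []) gB))) = mkPend dl order gA gB := rfl
  rw [hpend]
  have hlen : (mkPend dl order gA gB).length = order.length := by simp [mkPend]
  rw [hlen, loop_eq dl order gA gB]
  simp
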